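-- pv_equiv track=rewrite | github.com/JoelSin-student/singer.joel | sources/util.py | merge_missing_flags
-- ===== SOURCE A (Python) =====
-- def merge_missing_flags(base_cmd, extra_options, allowed_flags):
--     merged_cmd = list(base_cmd)
--     existing_flags = {token for token in merged_cmd if isinstance(token, str) and token.startswith("--")}
--     added_tokens = []
--
--     i = 0
--     while i < len(extra_options):
--         token = extra_options[i]
--         if not token.startswith("--"):
--             i += 1
--             continue
--
--         flag = token
--         has_value = i + 1 < len(extra_options) and not extra_options[i + 1].startswith("--")
--         value = extra_options[i + 1] if has_value else None
--         step = 2 if has_value else 1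
--
--         if flag in allowed_flags and flag not in existing_flags:
--             merged_cmd.append(flag)
--             added_tokens.append(flag)
--             if has_value:
--                 merged_cmd.append(value)
--                 added_tokens.append(value)
--             existing_flags.add(flag)
--
--         i += step
--
--     return merged_cmd, added_tokens
-- ===== SOURCE B (Python) =====
-- def merge_missing_flags(base_cmd, extra_options, allowed_flags):
--     # Pass 1: group extra_options into (flag, value-or-None) pairs.
--     pairs = []
--     i = 0
--     n = len(extra_options)
--     while i < n:
--         tok = extra_options[i]
--         if tok.startswith("--"):
--             if i + 1 < n and not extra_options[i + 1].startswith("--"):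
--                 pairs.append((tok, extra_options[i + 1]))
--                 i += 2
--             else:
--                 pairs.append((tok, None))
--                 i += 1
--         else:
--             i += 1
--     # Pass 2: append allowed, not-yet-present flags (with their values).
--     merged_cmd = list(base_cmd)
--     added_tokens = []
--     existing_flags = {t for t in base_cmd if isinstance(t, str) and t.startswith("--")}
--     for flag, value in pairs:
--         if flag in allowed_flags and flag not in existing_flags:
--             merged_cmd.append(flag)
--             added_tokens.append(flag)
--             if value is not None:
--                 merged_cmd.append(value)
--                 added_tokens.append(value)
--             existing_flags.add(flag)
--     return merged_cmd, added_tokens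
-- ===== Notes on version B (the rewrite author's own statement) =====
-- stated objective: alternative
-- what changed: B replaces A's single index-stepping while-loop (doing lookahead, filtering and appending at once) with a two-phase decomposition: first a grouping pass that parses extra_options into (flag, optional value) pairs, then a separate filtering pass over the pairs maintaining the existing-flags set.
import Mathlib
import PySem

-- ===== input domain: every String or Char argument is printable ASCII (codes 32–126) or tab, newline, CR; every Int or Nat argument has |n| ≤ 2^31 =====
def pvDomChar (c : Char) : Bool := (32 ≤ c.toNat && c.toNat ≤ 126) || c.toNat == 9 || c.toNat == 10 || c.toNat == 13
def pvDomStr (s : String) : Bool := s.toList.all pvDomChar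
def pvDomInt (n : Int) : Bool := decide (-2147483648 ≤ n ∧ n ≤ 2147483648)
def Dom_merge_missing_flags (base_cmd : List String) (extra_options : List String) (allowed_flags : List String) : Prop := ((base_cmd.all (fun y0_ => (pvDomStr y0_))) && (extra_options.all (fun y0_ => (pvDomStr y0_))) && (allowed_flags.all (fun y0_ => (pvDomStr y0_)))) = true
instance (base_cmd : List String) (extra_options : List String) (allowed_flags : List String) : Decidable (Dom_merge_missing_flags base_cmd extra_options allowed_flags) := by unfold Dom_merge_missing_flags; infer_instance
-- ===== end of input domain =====

-- B re-decomposes A's single index-stepping loop into a grouping pass (flag/value pairs) followed by a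
-- filtering pass; equal return values are proved on the whole domain (no mutation involved).

-- ===== PORT A =====
-- A's while-loop over index i, written as recursion on the remaining suffix of extra_options
-- (advancing by 1 or 2 exactly as A's `step` does).
def mmfLoopA (allowed_flags : List String) : List String → PySem.Set String → List String → List String → List String × List String
  | [], _, merged, added => (merged, added)
  | token :: rest, existing, merged, added =>
    if PySem.Str.startswith token "--" then
      match rest with
      | v :: rest2 =>
        if PySem.Str.startswith v "--" then
          -- has_value = False, step = 1
          if allowed_flags.contains token && !(PySem.Set.contains existing token) then
            mmfLoopA allowed_flags (v :: rest2) (PySem.Set.add existing token) (merged ++ [token]) (added ++ [token])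
          else
            mmfLoopA allowed_flags (v :: rest2) existing merged added
        else
          -- has_value = True, step = 2
          if allowed_flags.contains token && !(PySem.Set.contains existing token) then
            mmfLoopA allowed_flags rest2 (PySem.Set.add existing token) (merged ++ [token, v]) (added ++ [token, v])
          else
            mmfLoopA allowed_flags rest2 existing merged added
      | [] =>
        -- has_value = False, step = 1 (loop then terminates)
        if allowed_flags.contains token && !(PySem.Set.contains existing token) then
          (merged ++ [token], added ++ [token])
        else
          (merged, added)
    else
      mmfLoopA allowed_flags rest existing merged added
termination_by opts _ _ _ => opts.length
decreasing_by all_goals simp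

def merge_missing_flags (base_cmd : List String) (extra_options : List String) (allowed_flags : List String) : List String × List String :=
  let merged_cmd := base_cmd
  let existing_flags := PySem.Set.ofList (merged_cmd.filter (fun t => PySem.Str.startswith t "--"))
  mmfLoopA allowed_flags extra_options existing_flags merged_cmd []

-- ===== PORT B =====
-- Pass 1 of Source B: group extra_options into (flag, optional value) pairs.
def mmfParse : List String → List (String × Option String)
  | [] => []
  | tok :: rest =>
    if PySem.Str.startswith tok "--" then
      match rest with
      | v :: rest2 =>
        if PySem.Str.startswith v "--" then (tok, none) :: mmfParse (v :: rest2)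
        else (tok, some v) :: mmfParse rest2
      | [] => [(tok, none)]
    else
      mmfParse rest
termination_by opts => opts.length
decreasing_by all_goals simp

-- Pass 2 of Source B: filter the pairs against allowed_flags and the running existing_flags set.
def mmfFilterB (allowed_flags : List String) : List (String × Option String) → PySem.Set String → List String → List String → List String × List String
  | [], _, merged, added => (merged, added)
  | (flag, value) :: ps, existing, merged, added =>
    if allowed_flags.contains flag && !(PySem.Set.contains existing flag) then
      match value with
      | some v => mmfFilterB allowed_flags ps (PySem.Set.add existing flag) (merged ++ [flag, v]) (added ++ [flag, v])
      | none => mmfFilterB allowed_flags ps (PySem.Set.add existing flag) (merged ++ [flag]) (added ++ [flag])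
    else
      mmfFilterB allowed_flags ps existing merged added

def merge_missing_flags_alt (base_cmd : List String) (extra_options : List String) (allowed_flags : List String) : List String × List String :=
  let pairs := mmfParse extra_options
  let existing_flags := PySem.Set.ofList (base_cmd.filter (fun t => PySem.Str.startswith t "--"))
  mmfFilterB allowed_flags pairs existing_flags base_cmd []

-- ===== PRECONDITION & SPEC =====
def Spec_merge_missing_flags (base_cmd : List String) (extra_options : List String) (allowed_flags : List String) (out : List String × List String) : Prop := out = merge_missing_flags_alt base_cmd extra_options allowed_flags
instance (base_cmd : List String) (extra_options : List String) (allowed_flags : List String) (out : List String × List String) : Decidable (Spec_merge_missing_flags base_cmd extra_options allowed_flags out) := by unfold Spec_merge_missing_flags; infer_instance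

-- ===== CLAIM (what is proved, stated in full; the proofs are below) =====
def Claim_equal_merge_missing_flags : Prop := ∀ (base_cmd : List String) (extra_options : List String) (allowed_flags : List String), Dom_merge_missing_flags base_cmd extra_options allowed_flags → Spec_merge_missing_flags base_cmd extra_options allowed_flags (merge_missing_flags base_cmd extra_options allowed_flags)

-- ===== LEMMAS AND PROOFS =====
theorem mmfFilterB_cons (af : List String) (flag : String) (value : Option String)
    (ps : List (String × Option String)) (e : PySem.Set String) (m a : List String) :
    mmfFilterB af ((flag, value) :: ps) e m a =
      if af.contains flag && !(PySem.Set.contains e flag) then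
        (match value with
         | some v => mmfFilterB af ps (PySem.Set.add e flag) (m ++ [flag, v]) (a ++ [flag, v])
         | none => mmfFilterB af ps (PySem.Set.add e flag) (m ++ [flag]) (a ++ [flag]))
      else mmfFilterB af ps e m a := rfl

theorem mmfLoopA_eq_parse_filter (allowed_flags : List String) (opts : List String) :
    ∀ (existing : PySem.Set String) (merged added : List String),
      mmfLoopA allowed_flags opts existing merged added
        = mmfFilterB allowed_flags (mmfParse opts) existing merged added := by
  induction opts using mmfParse.induct with
  | case1 =>
      intro existing merged added
      simp [mmfLoopA, mmfParse, mmfFilterB]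
  | case2 tok hs v rest2 hv ih =>
      intro existing merged added
      simp only [mmfLoopA, mmfParse, hs, hv, if_true, ite_true, reduceIte]
      rw [mmfFilterB_cons]
      split_ifs <;> apply ih
  | case3 tok hs v rest2 hv ih =>
      intro existing merged added
      simp only [mmfLoopA, mmfParse, hs, hv, if_true, ite_true, ite_false, Bool.false_eq_true, reduceIte]
      rw [mmfFilterB_cons]
      split_ifs <;> apply ih
  | case4 tok hs =>
      intro existing merged added
      simp only [mmfLoopA, mmfParse, hs, ite_true, reduceIte]
      rw [mmfFilterB_cons]
      split_ifs <;> rfl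
  | case5 tok rest hs ih =>
      intro existing merged added
      rw [Bool.not_eq_true] at hs
      first
        | (simp only [mmfLoopA, mmfParse, hs, Bool.false_eq_true, not_false_eq_true,
             ite_false, if_false, reduceIte]
           apply ih)
        | (rw [mmfLoopA.eq_def, mmfParse.eq_def]
           simp only [hs, Bool.false_eq_true, not_false_eq_true, ite_false, if_false, reduceIte]
           apply ih)
        | (rw [mmfLoopA.eq_def, mmfParse.eq_def]
           split <;> simp_all <;> apply ih)

-- ===== VERDICT (by name: the statement is the Claim_ definition above) =====
theorem merge_missing_flags_spec : Claim_equal_merge_missing_flags := by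
  intro base_cmd extra_options allowed_flags _
  unfold Spec_merge_missing_flags merge_missing_flags merge_missing_flags_alt
  exact mmfLoopA_eq_parse_filter _ _ _ _ _
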